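-- pv_equiv track=rewrite | github.com/kantai/passe-pypy-taint-tracking | pypy/module/micronumpy/strides.py | calculate_dot_strides
-- ===== SOURCE A (Python) =====
-- def calculate_dot_strides(strides, backstrides, res_shape, skip_dims):
--     rstrides = [0] * len(res_shape)
--     rbackstrides = [0] * len(res_shape)
--     j = 0
--     for i in range(len(res_shape)):
--         if i in skip_dims:
--             rstrides[i] = 0
--             rbackstrides[i] = 0
--         else:
--             rstrides[i] = strides[j]
--             rbackstrides[i] = backstrides[j]
--             j += 1
--     return rstrides, rbackstrides
-- ===== SOURCE B (Python) =====
-- def calculate_dot_strides(strides, backstrides, res_shape, skip_dims):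
--     n = len(res_shape)
--     skips = sorted({i for i in skip_dims if 0 <= i < n})
--     m = n - len(skips)
--     rstrides = list(strides[:m])
--     rbackstrides = list(backstrides[:m])
--     for i in skips:
--         rstrides.insert(i, 0)
--         rbackstrides.insert(i, 0)
--     return rstrides, rbackstrides
-- ===== Notes on version B (the rewrite author's own statement) =====
-- stated objective: alternative
-- what changed: Instead of A's zero-initialized output arrays filled by a per-index loop that tests each i against skip_dims and advances a counter, B copies the needed prefix of strides/backstrides and inserts zeros at the sorted, deduplicated in-range skip positions.
import Mathlib
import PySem

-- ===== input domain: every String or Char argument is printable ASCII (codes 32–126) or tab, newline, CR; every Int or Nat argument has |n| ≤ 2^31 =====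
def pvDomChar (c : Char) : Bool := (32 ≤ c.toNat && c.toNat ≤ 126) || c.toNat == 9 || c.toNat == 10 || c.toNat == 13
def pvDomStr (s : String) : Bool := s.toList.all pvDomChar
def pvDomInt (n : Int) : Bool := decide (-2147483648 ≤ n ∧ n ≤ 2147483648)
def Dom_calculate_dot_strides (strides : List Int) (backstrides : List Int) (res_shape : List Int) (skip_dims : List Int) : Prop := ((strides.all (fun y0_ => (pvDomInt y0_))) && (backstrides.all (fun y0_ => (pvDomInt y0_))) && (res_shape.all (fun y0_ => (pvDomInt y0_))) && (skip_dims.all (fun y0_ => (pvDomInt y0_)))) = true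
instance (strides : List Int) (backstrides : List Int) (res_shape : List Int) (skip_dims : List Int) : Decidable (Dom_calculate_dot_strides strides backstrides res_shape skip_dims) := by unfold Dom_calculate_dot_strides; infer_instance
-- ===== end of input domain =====

-- B replaces A's zero-array + per-index skip-test/counter loop by a different construction:
-- copy the needed prefix of strides/backstrides and INSERT zeros at the (sorted, deduplicated)
-- skip positions (alternative algorithm, same cost).

-- ===== PORT A =====
-- A's loop: for i in range(len(res_shape)): branch on 'i in skip_dims', counter j.
-- strides[j]/backstrides[j] are read with getD 0; Pre_ guarantees j is in range
-- (Python raises IndexError exactly when it is not, and those inputs are outside Pre_).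
def pvLoopA (strides backstrides skip_dims : List Int) :
    List Nat → List Int × List Int × Nat → List Int × List Int × Nat
  | [], st => st
  | i :: rest, (rs, rbs, j) =>
      if skip_dims.contains (i : Int) then
        pvLoopA strides backstrides skip_dims rest (rs.set i 0, rbs.set i 0, j)
      else
        pvLoopA strides backstrides skip_dims rest
          (rs.set i (strides.getD j 0), rbs.set i (backstrides.getD j 0), j + 1)

def calculate_dot_strides (strides : List Int) (backstrides : List Int) (res_shape : List Int) (skip_dims : List Int) : List Int × List Int :=
  let n := res_shape.length
  let r := pvLoopA strides backstrides skip_dims (List.range n)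
      (List.replicate n 0, List.replicate n 0, 0)
  (r.1, r.2.1)

-- ===== PORT B =====
-- for i in skips: rstrides.insert(i, 0); rbackstrides.insert(i, 0)
def pvInsB : List Int → List Int × List Int → List Int × List Int
  | [], st => st
  | p :: ps, (rs, rbs) =>
      pvInsB ps (PySem.List.insert rs p 0, PySem.List.insert rbs p 0)

def calculate_dot_strides_alt (strides : List Int) (backstrides : List Int) (res_shape : List Int) (skip_dims : List Int) : List Int × List Int :=
  let n := res_shape.length
  -- skips = sorted({i for i in skip_dims if 0 <= i < n})
  let skips := PySem.List.sorted
      (PySem.Set.ofList (skip_dims.filter (fun x => decide (0 ≤ x) && decide (x < (n : Int)))))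
      (fun x => x)
  let m := n - skips.length
  pvInsB skips (strides.take m, backstrides.take m)

-- ===== PRECONDITION & SPEC =====
-- Pre_ excludes exactly the inputs where Python A raises IndexError: when the number of
-- kept dimensions exceeds len(strides) or len(backstrides).
def Pre_calculate_dot_strides (strides : List Int) (backstrides : List Int) (res_shape : List Int) (skip_dims : List Int) : Prop :=
  ((List.range res_shape.length).filter (fun (i : Nat) => !skip_dims.contains (i : Int))).length ≤ strides.length ∧
  ((List.range res_shape.length).filter (fun (i : Nat) => !skip_dims.contains (i : Int))).length ≤ backstrides.length
instance (strides : List Int) (backstrides : List Int) (res_shape : List Int) (skip_dims : List Int) : Decidable (Pre_calculate_dot_strides strides backstrides res_shape skip_dims) := by unfold Pre_calculate_dot_strides; infer_instance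

def pvWitness_calculate_dot_strides : List Int × List Int × List Int × List Int :=
  ([1, 2], [3, 4], [5, 6, 7], [1])

def Spec_calculate_dot_strides (strides : List Int) (backstrides : List Int) (res_shape : List Int) (skip_dims : List Int) (out : List Int × List Int) : Prop := out = calculate_dot_strides_alt strides backstrides res_shape skip_dims
instance (strides : List Int) (backstrides : List Int) (res_shape : List Int) (skip_dims : List Int) (out : List Int × List Int) : Decidable (Spec_calculate_dot_strides strides backstrides res_shape skip_dims out) := by unfold Spec_calculate_dot_strides; infer_instance

-- ===== CLAIM (what is proved, stated in full; the proofs are below) =====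
def Claim_equal_calculate_dot_strides : Prop := ∀ (strides : List Int) (backstrides : List Int) (res_shape : List Int) (skip_dims : List Int), Dom_calculate_dot_strides strides backstrides res_shape skip_dims → Pre_calculate_dot_strides strides backstrides res_shape skip_dims → Spec_calculate_dot_strides strides backstrides res_shape skip_dims (calculate_dot_strides strides backstrides res_shape skip_dims)

-- ===== LEMMAS AND PROOFS =====

-- proof-side abbreviations: the skip / keep positions of range n, A-side scatter, B-side zero-insertion
def pvSkipN (skip_dims : List Int) (n : Nat) : List Nat :=
  (List.range n).filter (fun i => skip_dims.contains (i : Int))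
def pvKeepN (skip_dims : List Int) (n : Nat) : List Nat :=
  (List.range n).filter (fun i => !skip_dims.contains (i : Int))
def pvScat (v : List Int) : List Nat → Nat → List Int → List Int
  | [], _, rs => rs
  | i :: ks, j, rs => pvScat v ks (j + 1) (rs.set i (v.getD j 0))
def pvInsZ : List Nat → List Int → List Int
  | [], b => b
  | p :: S, b => pvInsZ S (PySem.List.insert b (p : Int) 0)

theorem pv_set_getD_self {rs : List Int} {i : Nat} (h : rs.getD i 0 = 0) :
    rs.set i 0 = rs := by
  by_cases hi : i < rs.length
  · have h0 : rs[i] = 0 := by simpa [List.getD, List.getElem?_eq_getElem hi] using h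
    rw [← h0]; exact List.set_getElem_self hi
  · exact List.set_eq_of_length_le (by omega)

theorem pv_getD_set_ne {rs : List Int} {i i' : Nat} {v : Int} (h : i ≠ i') :
    (rs.set i v).getD i' 0 = rs.getD i' 0 := by
  simp [List.getD, List.getElem?_set_ne h]

-- A's loop is a scatter of strides / backstrides into the kept positions
theorem pv_loop_eq (strides backstrides skip_dims : List Int) :
    ∀ (is : List Nat) (rs rbs : List Int) (j : Nat), is.Nodup →
    (∀ i ∈ is, rs.getD i 0 = 0) → (∀ i ∈ is, rbs.getD i 0 = 0) →
    ((pvLoopA strides backstrides skip_dims is (rs, rbs, j)).1,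
     (pvLoopA strides backstrides skip_dims is (rs, rbs, j)).2.1) =
    (pvScat strides (is.filter (fun (i : Nat) => !skip_dims.contains (i : Int))) j rs,
     pvScat backstrides (is.filter (fun (i : Nat) => !skip_dims.contains (i : Int))) j rbs) := by
  intro is
  induction is with
  | nil => intro rs rbs j _ _ _; simp [pvLoopA, pvScat]
  | cons i rest ih =>
    intro rs rbs j hnd hrs hrbs
    have hnd' := (List.nodup_cons.mp hnd).2
    have hni := (List.nodup_cons.mp hnd).1
    by_cases hc : skip_dims.contains (i : Int) = true
    · have h1 : rs.set i 0 = rs := pv_set_getD_self (hrs i (by simp))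
      have h2 : rbs.set i 0 = rbs := pv_set_getD_self (hrbs i (by simp))
      simp only [pvLoopA, List.filter_cons, hc, if_true, h1, h2, Bool.not_true,
        Bool.false_eq_true, if_false]
      exact ih rs rbs j hnd' (fun i' h => hrs i' (by simp [h])) (fun i' h => hrbs i' (by simp [h]))
    · simp only [Bool.not_eq_true] at hc
      simp only [pvLoopA, List.filter_cons, hc, Bool.not_false, if_true,
        Bool.false_eq_true, if_false, pvScat]
      apply ih _ _ _ hnd'
      · intro i' h
        rw [pv_getD_set_ne (fun he => hni (by rw [he]; exact h))]; exact hrs i' (by simp [h])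
      · intro i' h
        rw [pv_getD_set_ne (fun he => hni (by rw [he]; exact h))]; exact hrbs i' (by simp [h])

theorem pv_getD_replicate (n i : Nat) : (List.replicate n (0 : Int)).getD i 0 = 0 := by
  simp [List.getD]

theorem pvScat_length (v : List Int) :
    ∀ (ks : List Nat) (j : Nat) (rs : List Int), (pvScat v ks j rs).length = rs.length := by
  intro ks
  induction ks with
  | nil => intro j rs; rfl
  | cons i ks ih => intro j rs; simp [pvScat, ih]

theorem pvScat_append_tail (v : List Int) :
    ∀ (ks : List Nat) (j : Nat) (rs t : List Int), (∀ p ∈ ks, p < rs.length) →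
    pvScat v ks j (rs ++ t) = pvScat v ks j rs ++ t := by
  intro ks
  induction ks with
  | nil => intro j rs t _; rfl
  | cons i ks ih =>
    intro j rs t h
    have hi : i < rs.length := h i (by simp)
    simp only [pvScat, List.set_append_left _ _ hi]
    exact ih (j + 1) _ t (fun p hp => by
      have := h p (by simp [hp]); simpa using this)

theorem pvScat_snoc (v : List Int) :
    ∀ (ks : List Nat) (q : Nat) (j : Nat) (rs : List Int),
    pvScat v (ks ++ [q]) j rs = (pvScat v ks j rs).set q (v.getD (j + ks.length) 0) := by
  intro ks
  induction ks with
  | nil => intro q j rs; simp [pvScat]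
  | cons i ks ih =>
    intro q j rs
    simp only [List.cons_append, pvScat, ih]
    congr 2
    simp only [List.length_cons]
    omega

theorem pvInsZ_snoc : ∀ (S : List Nat) (p : Nat) (b : List Int),
    pvInsZ (S ++ [p]) b = PySem.List.insert (pvInsZ S b) (p : Int) 0 := by
  intro S
  induction S with
  | nil => intro p b; rfl
  | cons q S ih => intro p b; simp [pvInsZ, ih]

-- insertions whose t-th position is ≤ len b + t never touch a trailing appended element
theorem pvInsZ_append_elem :
    ∀ (S : List Nat) (b : List Int) (x : Int),
    (∀ t (ht : t < S.length), S[t] ≤ b.length + t) →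
    pvInsZ S (b ++ [x]) = pvInsZ S b ++ [x] := by
  intro S
  induction S with
  | nil => intro b x _; rfl
  | cons p S ih =>
    intro b x h
    have h0 : p ≤ b.length := by simpa using h 0 (by simp)
    have hins : PySem.List.insert (b ++ [x]) (p : Int) 0 =
        PySem.List.insert b (p : Int) 0 ++ [x] := by
      rw [PySem.List.insert_natCast _ _ _ (by simp; omega),
          PySem.List.insert_natCast _ _ _ h0,
          List.take_append_of_le_length h0, List.drop_append_of_le_length h0]
      simp
    have hlen : (PySem.List.insert b (p : Int) 0).length = b.length + 1 := by
      rw [PySem.List.insert_natCast _ _ _ h0]; simp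
    show pvInsZ S (PySem.List.insert (b ++ [x]) (p : Int) 0) =
      pvInsZ S (PySem.List.insert b (p : Int) 0) ++ [x]
    rw [hins]
    apply ih
    intro t ht
    have h2 := h (t + 1) (by simpa using Nat.succ_lt_succ ht)
    simp only [List.getElem_cons_succ] at h2
    omega

theorem pv_set_len (L : List Int) (x y : Int) (k : Nat) (h : k = L.length) :
    (L ++ [y]).set k x = L ++ [x] := by subst h; simp

theorem pv_len_add (sd : List Int) (n : Nat) :
    (pvSkipN sd n).length + (pvKeepN sd n).length = n := by
  have h := List.length_eq_length_filter_add (l := List.range n)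
      (fun i => sd.contains (i : Int))
  unfold pvSkipN pvKeepN
  simp only [List.length_range] at h
  omega

theorem pvSkipN_succ (sd : List Int) (n : Nat) :
    pvSkipN sd (n + 1) =
      if sd.contains (n : Int) then pvSkipN sd n ++ [n] else pvSkipN sd n := by
  unfold pvSkipN
  rw [List.range_succ, List.filter_append]
  by_cases hc : ((n : Int) ∈ sd) <;> simp [hc]

theorem pvKeepN_succ (sd : List Int) (n : Nat) :
    pvKeepN sd (n + 1) =
      if sd.contains (n : Int) then pvKeepN sd n else pvKeepN sd n ++ [n] := by
  unfold pvKeepN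
  rw [List.range_succ, List.filter_append]
  by_cases hc : ((n : Int) ∈ sd) <;> simp [hc]

theorem pvKeepN_mem_lt (sd : List Int) (n : Nat) {p : Nat} (h : p ∈ pvKeepN sd n) : p < n := by
  unfold pvKeepN at h
  exact List.mem_range.mp (List.mem_filter.mp h).1

-- the t-th skip position is at most (number of kept dims) + t
theorem pv_skip_bound (sd : List Int) :
    ∀ (n : Nat) (t : Nat) (ht : t < (pvSkipN sd n).length),
    (pvSkipN sd n)[t] ≤ (pvKeepN sd n).length + t := by
  intro n
  induction n with
  | zero => intro t ht; simp [pvSkipN] at ht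
  | succ n ih =>
    intro t ht
    by_cases hc : sd.contains (n : Int) = true
    · simp only [pvSkipN_succ, pvKeepN_succ, hc, if_true] at ht ⊢
      by_cases hlt : t < (pvSkipN sd n).length
      · rw [List.getElem_append_left hlt]
        exact Nat.le_trans (ih t hlt) (by omega)
      · have hts : t = (pvSkipN sd n).length := by
          simp [List.length_append] at ht; omega
        subst hts
        rw [List.getElem_concat_length rfl]
        have := pv_len_add sd n
        omega
    · simp only [pvSkipN_succ, pvKeepN_succ, hc, if_false, Bool.false_eq_true] at ht ⊢
      exact Nat.le_trans (ih t ht) (by simp)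

-- MAIN: inserting zeros at the skip positions into the used prefix of v
-- equals scattering v into the kept positions of a zero array
theorem pv_main (sd : List Int) :
    ∀ (n : Nat) (v : List Int), (pvKeepN sd n).length ≤ v.length →
    pvInsZ (pvSkipN sd n) (v.take (pvKeepN sd n).length) =
      pvScat v (pvKeepN sd n) 0 (List.replicate n 0) := by
  intro n
  induction n with
  | zero => intro v _; simp [pvSkipN, pvKeepN, pvInsZ, pvScat]
  | succ n ih =>
    intro v hv
    have hscatlen : (pvScat v (pvKeepN sd n) 0 (List.replicate n (0 : Int))).length = n := by
      rw [pvScat_length]; simp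
    have hrep : List.replicate (n + 1) (0 : Int) = List.replicate n 0 ++ [0] :=
      List.replicate_succ'
    have hkeeplt : ∀ p ∈ pvKeepN sd n, p < (List.replicate n (0 : Int)).length := by
      intro p hp; simpa using pvKeepN_mem_lt sd n hp
    by_cases hc : sd.contains (n : Int) = true
    · -- n is skipped: append one more zero-insertion at position n
      rw [pvSkipN_succ, if_pos hc, pvKeepN_succ, if_pos hc] at *
      have hm := hv
      rw [pvInsZ_snoc, ih v hm, hrep, pvScat_append_tail v _ 0 _ _ hkeeplt]
      rw [show ((n : Nat) : Int) = ((pvScat v (pvKeepN sd n) 0 (List.replicate n 0)).length : Int) by rw [hscatlen],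
        PySem.List.insert_natCast _ _ _ (le_refl _)]
      simp
    · -- n is kept: one more stride element lands at the end
      rw [pvSkipN_succ, if_neg hc, pvKeepN_succ, if_neg hc] at *
      have hlen : (pvKeepN sd n ++ [n]).length = (pvKeepN sd n).length + 1 := by simp
      rw [hlen] at hv ⊢
      have hm : (pvKeepN sd n).length < v.length := by omega
      rw [List.take_succ_eq_append_getElem hm]
      have hbound : ∀ t (ht : t < (pvSkipN sd n).length),
          (pvSkipN sd n)[t] ≤ (v.take (pvKeepN sd n).length).length + t := by
        intro t ht
        have := pv_skip_bound sd n t ht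
        have hl : (v.take (pvKeepN sd n).length).length = (pvKeepN sd n).length := by
          simp; omega
        omega
      rw [pvInsZ_append_elem _ _ _ hbound, ih v (by omega)]
      rw [pvScat_snoc, hrep, pvScat_append_tail v _ 0 _ _ hkeeplt]
      have hgetD : v.getD (0 + (pvKeepN sd n).length) 0 = v[(pvKeepN sd n).length] := by
        simp [List.getD, List.getElem?_eq_getElem hm]
      rw [hgetD, pv_set_len _ _ _ _ hscatlen.symm]

-- B's sorted set of in-range skip dims IS the (cast) list of skip positions of range n
theorem pv_skips_mem (sd : List Int) (n : Nat) (y : Int) :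
    (y ∈ List.map (fun i : Nat => (i : Int)) (pvSkipN sd n)) ↔
      (y ∈ sd ∧ 0 ≤ y ∧ y < (n : Int)) := by
  constructor
  · intro hy
    rcases List.mem_map.mp hy with ⟨i, hi, rfl⟩
    rcases List.mem_filter.mp hi with ⟨hr, hcont⟩
    exact ⟨by simpa using hcont, by exact_mod_cast Nat.zero_le i,
      by exact_mod_cast List.mem_range.mp hr⟩
  · rintro ⟨hmem, h0, hn⟩
    refine List.mem_map.mpr ⟨y.toNat, List.mem_filter.mpr ⟨List.mem_range.mpr (by omega), ?_⟩,
      Int.toNat_of_nonneg h0⟩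
    rw [Int.toNat_of_nonneg h0]
    simpa using hmem

theorem pv_skips_eq (sd : List Int) (n : Nat) :
    PySem.List.sorted
      (PySem.Set.ofList (sd.filter (fun x => decide (0 ≤ x) && decide (x < (n : Int)))))
      (fun x => x) = List.map (fun i : Nat => (i : Int)) (pvSkipN sd n) := by
  apply PySem.List.sorted_eq_of_perm_of_pairwise_lt
  · refine (List.perm_ext_iff_of_nodup ?_ (PySem.Set.nodup_ofList _)).mpr ?_
    · exact List.Nodup.map (fun a b h => by exact_mod_cast h)
        (List.Nodup.filter _ List.nodup_range)
    · intro y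
      rw [pv_skips_mem]
      simp only [PySem.Set.mem_ofList, List.mem_filter, Bool.and_eq_true, decide_eq_true_eq]
  · unfold pvSkipN
    exact List.Pairwise.map _ (fun a b (hab : a < b) => by exact_mod_cast hab)
      (List.Pairwise.filter _ List.pairwise_lt_range)

theorem pvInsB_eq : ∀ (ps : List Int) (rs rbs : List Int),
    pvInsB ps (rs, rbs) =
      (ps.foldl (fun acc p => PySem.List.insert acc p 0) rs,
       ps.foldl (fun acc p => PySem.List.insert acc p 0) rbs) := by
  intro ps
  induction ps with
  | nil => intro rs rbs; rfl
  | cons p ps ih => intro rs rbs; simp [pvInsB, ih]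

theorem pv_foldl_insZ : ∀ (S : List Nat) (b : List Int),
    List.foldl (fun acc p => PySem.List.insert acc p 0) b
      (List.map (fun i : Nat => (i : Int)) S) = pvInsZ S b := by
  intro S
  induction S with
  | nil => intro b; rfl
  | cons p S ih => intro b; simp only [List.map_cons, List.foldl_cons, pvInsZ, ih]

-- the two ports, written as scatter / zero-insertion over the skip and keep position lists
theorem pv_a_eq (strides backstrides res_shape skip_dims : List Int) :
    calculate_dot_strides strides backstrides res_shape skip_dims =
      (pvScat strides (pvKeepN skip_dims res_shape.length) 0
         (List.replicate res_shape.length 0),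
       pvScat backstrides (pvKeepN skip_dims res_shape.length) 0
         (List.replicate res_shape.length 0)) := by
  unfold calculate_dot_strides
  exact pv_loop_eq strides backstrides skip_dims (List.range res_shape.length)
    (List.replicate res_shape.length 0) (List.replicate res_shape.length 0) 0
    List.nodup_range (fun i _ => pv_getD_replicate _ i) (fun i _ => pv_getD_replicate _ i)

theorem pv_alt_eq (strides backstrides res_shape skip_dims : List Int) :
    calculate_dot_strides_alt strides backstrides res_shape skip_dims =
      (pvInsZ (pvSkipN skip_dims res_shape.length)
         (strides.take (pvKeepN skip_dims res_shape.length).length),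
       pvInsZ (pvSkipN skip_dims res_shape.length)
         (backstrides.take (pvKeepN skip_dims res_shape.length).length)) := by
  have hm : res_shape.length - (pvSkipN skip_dims res_shape.length).length
      = (pvKeepN skip_dims res_shape.length).length := by
    have := pv_len_add skip_dims res_shape.length; omega
  unfold calculate_dot_strides_alt
  simp only [pv_skips_eq, List.length_map]
  rw [pvInsB_eq, pv_foldl_insZ, pv_foldl_insZ, hm]

-- ===== VERDICT (by name: the statement is the Claim_ definition above) =====
theorem calculate_dot_strides_spec : Claim_equal_calculate_dot_strides := by
  intro strides backstrides res_shape skip_dims _ hpre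
  obtain ⟨h1, h2⟩ := hpre
  unfold Spec_calculate_dot_strides
  rw [pv_a_eq, pv_alt_eq,
    pv_main skip_dims res_shape.length strides h1,
    pv_main skip_dims res_shape.length backstrides h2]
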